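-- pv_equiv track=rewrite | github.com/ayush2723/Biokit | biokit2/tools/splice_side_predictor/splice_logic.py | find_splice_sites
-- ===== SOURCE A (Python) =====
-- def find_splice_sites(seq, window=10):
--     """
--     Predicts potential splice donor and acceptor sites in a DNA sequence.
--
--     Splice sites are short conserved sequences typically found at exon-intron boundaries:
--     - Donor sites: 'GT' (beginning of intron)
--     - Acceptor sites: 'AG' (end of intron)
--
--     Args:
--         seq (str): DNA sequence to analyze.
--
--     Returns:
--         Tuple[List[int], List[int]]: Two lists containing 0-based start indices of:
--             - Donor site positions (GT)
--             - Acceptor site positions (AG)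
--     """
--     donor_sites = []
--     acceptor_sites = []
--
--     for i in range(len(seq) - 1):
--         dinuc = seq[i:i+2].upper()
--         if dinuc == 'GT':
--             donor_sites.append(i)
--         elif dinuc == 'AG':
--             acceptor_sites.append(i)
--
--     return donor_sites, acceptor_sites
-- ===== SOURCE B (Python) =====
-- def find_splice_sites(seq, window=10):
--     s = seq.upper()
--
--     def scan(pat):
--         sites = []
--         i = s.find(pat)
--         while i != -1:
--             sites.append(i)
--             i = s.find(pat, i + 1)
--         return sites
--
--     return scan('GT'), scan('AG')
-- ===== Notes on version B (the rewrite author's own statement) =====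
-- stated objective: faster
-- what changed: Replaces the single interleaved index loop that slices and uppercases every dinucleotide with one upfront uppercase of the whole sequence followed by two independent str.find-driven scans (advancing start to hit+1), one for the donor pattern and one for the acceptor pattern.
import Mathlib
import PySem

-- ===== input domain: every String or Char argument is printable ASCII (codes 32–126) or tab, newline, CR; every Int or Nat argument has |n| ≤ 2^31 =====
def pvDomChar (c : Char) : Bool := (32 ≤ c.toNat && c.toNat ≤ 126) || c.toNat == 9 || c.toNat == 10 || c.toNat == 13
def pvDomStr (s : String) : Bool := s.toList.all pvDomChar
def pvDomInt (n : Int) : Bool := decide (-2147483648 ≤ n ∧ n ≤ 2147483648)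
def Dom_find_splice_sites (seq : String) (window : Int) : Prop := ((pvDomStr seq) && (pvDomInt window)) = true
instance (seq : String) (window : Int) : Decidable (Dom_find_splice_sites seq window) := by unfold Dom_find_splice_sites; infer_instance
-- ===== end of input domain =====

-- B uppercases the sequence once and runs two independent find-driven scans ('GT' then 'AG')
-- instead of A's single interleaved slice-and-uppercase index loop; same O(n) cost, return value only.

-- ===== PORT A =====
-- literal port of A: for i in range(len(seq)-1): dinuc = seq[i:i+2].upper(); if/elif append
def find_splice_sites (seq : String) (window : Int) : List Int × List Int :=
  let cs := seq.toList
  (PySem.List.pyRange 0 (PySem.List.len cs - 1)).foldl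
    (fun st i =>
      let dinuc := PySem.Chars.upper (PySem.List.slice cs (some i) (some (i + 2)))
      if dinuc = ['G', 'T'] then (st.1 ++ [i], st.2)
      else if dinuc = ['A', 'G'] then (st.1, st.2 ++ [i])
      else st)
    ([], [])

-- ===== PORT B =====
-- the while loop of Source B's scan(): i = s.find(pat, start); while i != -1: append i; start = i+1
-- (fuel = len(s)+1 only makes the recursion total; every hit advances start, so it never runs out)
def scanSites (s pat : List Char) : Nat → Nat → List Int
  | 0, _ => []
  | fuel + 1, start =>
      let i := PySem.Chars.findFrom s pat (start : Int)
      if i = -1 then [] else i :: scanSites s pat fuel (i.toNat + 1)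

def find_splice_sites_alt (seq : String) (window : Int) : List Int × List Int :=
  let s := PySem.Chars.upper seq.toList
  (scanSites s ['G', 'T'] (s.length + 1) 0, scanSites s ['A', 'G'] (s.length + 1) 0)

-- ===== PRECONDITION & SPEC =====
def Spec_find_splice_sites (seq : String) (window : Int) (out : List Int × List Int) : Prop := out = find_splice_sites_alt seq window
instance (seq : String) (window : Int) (out : List Int × List Int) : Decidable (Spec_find_splice_sites seq window out) := by unfold Spec_find_splice_sites; infer_instance

-- ===== CLAIM (what is proved, stated in full; the proofs are below) =====
def Claim_equal_find_splice_sites : Prop := ∀ (seq : String) (window : Int), Dom_find_splice_sites seq window → Spec_find_splice_sites seq window (find_splice_sites seq window)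

-- ===== LEMMAS AND PROOFS =====

-- a match at i ≥ start is an infix of u.drop start
lemma match_infix (u pat : List Char) (start i : Nat) (hle : start ≤ i)
    (h : pat <+: u.drop i) : pat <:+: u.drop start := by
  have hdd : (u.drop start).drop (i - start) = u.drop i := by
    rw [List.drop_drop]; congr 1; omega
  have hsuf : (u.drop start).drop (i - start) <:+ u.drop start := List.drop_suffix _ _
  rw [hdd] at hsuf
  exact h.isInfix.trans hsuf.isInfix

-- the find-driven scan enumerates exactly the match positions from 'start' on
lemma scan_spec (u pat : List Char) (hpat : pat ≠ []) :
    ∀ fuel start, start ≤ u.length → u.length - start < fuel →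
      scanSites u pat fuel start
        = ((List.range' start (u.length - start)).filter
            (fun i => decide (pat <+: u.drop i))).map (fun k : Nat => (k : Int)) := by
  intro fuel
  induction fuel with
  | zero => intro start _ h; omega
  | succ fuel ih =>
    intro start hstart hfuel
    by_cases hneg : PySem.Chars.findFrom u pat (start : Int) = -1
    · have hno := (PySem.Chars.findFrom_natCast_eq_neg_one_iff u pat start hstart).mp hneg
      have hfilt : ((List.range' start (u.length - start)).filter
          (fun i => decide (pat <+: u.drop i))) = [] := by
        rw [List.filter_eq_nil_iff]
        intro i hi
        have hmem := List.mem_range'.mp hi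
        simp only [decide_eq_true_eq]
        intro hpre
        exact hno (match_infix u pat start i (by omega) hpre)
      simp [scanSites, hneg, hfilt]
    · obtain ⟨hge, hpre, hmin⟩ := PySem.Chars.findFrom_natCast_spec u pat start hstart hneg
      set r := PySem.Chars.findFrom u pat (start : Int) with hr
      have hr0 : 0 ≤ r := le_trans (by exact_mod_cast Int.natCast_nonneg start) hge
      have hrs : start ≤ r.toNat := by omega
      have hrn : r.toNat + pat.length ≤ u.length := by
        have := hpre.length_le
        simp [List.length_drop] at this
        have hplen : 0 < pat.length := List.length_pos_iff.mpr hpat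
        omega
      have hplen : 0 < pat.length := List.length_pos_iff.mpr hpat
      have hrlt : r.toNat < u.length := by omega
      -- split the range at r.toNat
      have hsplit : List.range' start (u.length - start)
          = List.range' start (r.toNat - start) ++ List.range' r.toNat (u.length - r.toNat) := by
        have := @List.range'_append start (r.toNat - start) (u.length - r.toNat) 1
        rw [show start + 1 * (r.toNat - start) = r.toNat by omega] at this
        rw [this]; congr 1; omega
      have hcons : List.range' r.toNat (u.length - r.toNat)
          = r.toNat :: List.range' (r.toNat + 1) (u.length - (r.toNat + 1)) := by
        rw [show u.length - r.toNat = (u.length - (r.toNat + 1)) + 1 by omega]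
        rw [List.range'_succ]
      have hnil : ((List.range' start (r.toNat - start)).filter
          (fun i => decide (pat <+: u.drop i))) = [] := by
        rw [List.filter_eq_nil_iff]
        intro i hi
        have hmem := List.mem_range'.mp hi
        simp only [decide_eq_true_eq]
        exact hmin i (by omega) (by omega)
      have hrec := ih (r.toNat + 1) (by omega) (by omega)
      have hrInt : ((r.toNat : Nat) : Int) = r := Int.toNat_of_nonneg hr0
      simp only [scanSites, hneg, ← hr]
      rw [hsplit, List.filter_append, hnil, List.nil_append, hcons]
      rw [List.filter_cons_of_pos (by simpa using hpre)]
      simp [hrec, hrInt]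

-- A's fold computes the two filtered index lists
lemma fold_pair (cs : List Char) :
    ∀ (l : List Int) (accd acca : List Int),
      l.foldl
        (fun st i =>
          let dinuc := PySem.Chars.upper (PySem.List.slice cs (some i) (some (i + 2)))
          if dinuc = ['G', 'T'] then (st.1 ++ [i], st.2)
          else if dinuc = ['A', 'G'] then (st.1, st.2 ++ [i])
          else st)
        (accd, acca)
      = (accd ++ l.filter (fun i =>
            decide (PySem.Chars.upper (PySem.List.slice cs (some i) (some (i + 2))) = ['G', 'T'])),
         acca ++ l.filter (fun i =>
            decide (PySem.Chars.upper (PySem.List.slice cs (some i) (some (i + 2))) = ['A', 'G']))) := by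
  intro l
  induction l with
  | nil => simp
  | cons x xs ih =>
    intro accd acca
    simp only [List.foldl_cons, List.filter_cons]
    by_cases h1 : PySem.Chars.upper (PySem.List.slice cs (some x) (some (x + 2))) = ['G', 'T']
    · have h2 : ¬ PySem.Chars.upper (PySem.List.slice cs (some x) (some (x + 2))) = ['A', 'G'] := by
        rw [h1]; decide
      rw [if_pos h1, ih]
      simp [h1]
    · by_cases h2 : PySem.Chars.upper (PySem.List.slice cs (some x) (some (x + 2))) = ['A', 'G']
      · rw [if_neg h1, if_pos h2, ih]
        simp [h2]
      · rw [if_neg h1, if_neg h2, ih]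
        simp [h1, h2]

-- A's per-index test is the prefix test on the uppercased sequence
lemma pred_bridge (cs pat : List Char) (hlen : pat.length = 2) (k : Nat) :
    (PySem.Chars.upper (PySem.List.slice cs (some (k : Int)) (some ((k : Int) + 2))) = pat)
      ↔ pat <+: (PySem.Chars.upper cs).drop k := by
  have hsl : PySem.List.slice cs (some (k : Int)) (some ((k : Int) + 2)) = (cs.drop k).take 2 := by
    have : ((k : Int) + 2) = ((k + 2 : Nat) : Int) := by push_cast; ring
    rw [this, PySem.List.slice_natCast]
    congr 1; omega
  rw [hsl, PySem.Chars.upper, PySem.Chars.upper, List.map_take, List.map_drop]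
  rw [List.prefix_iff_eq_take, hlen]
  constructor <;> (intro h; exact h.symm)

-- no 2-char match at the last position
lemma filter_range_trim (u pat : List Char) (hlen : pat.length = 2) :
    (List.range u.length).filter (fun i => decide (pat <+: u.drop i))
      = (List.range (u.length - 1)).filter (fun i => decide (pat <+: u.drop i)) := by
  rcases Nat.eq_zero_or_pos u.length with h0 | hpos
  · rw [h0]
  · have : u.length = (u.length - 1) + 1 := by omega
    rw [this, List.range_succ, List.filter_append]
    have hno : ¬ pat <+: u.drop (u.length - 1) := by
      intro h
      have := h.length_le
      simp [List.length_drop] at this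
      omega
    simp [hno]

lemma scan_top (u pat : List Char) (hpat : pat ≠ []) (hlen : pat.length = 2) :
    scanSites u pat (u.length + 1) 0
      = ((List.range (u.length - 1)).filter
          (fun i => decide (pat <+: u.drop i))).map (fun k : Nat => (k : Int)) := by
  rw [scan_spec u pat hpat (u.length + 1) 0 (by omega) (by omega)]
  rw [Nat.sub_zero, ← List.range_eq_range', filter_range_trim u pat hlen]

-- ===== VERDICT (by name: the statement is the Claim_ definition above) =====
theorem find_splice_sites_spec : Claim_equal_find_splice_sites := by
  intro seq window _
  unfold Spec_find_splice_sites find_splice_sites find_splice_sites_alt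
  simp only []
  set cs := seq.toList with hcs
  set u := PySem.Chars.upper cs with hu
  have hul : u.length = cs.length := by rw [hu, PySem.Chars.upper, List.length_map]
  rw [fold_pair cs]
  simp only [List.nil_append]
  have hrange : PySem.List.pyRange 0 (PySem.List.len cs - 1)
      = (List.range (cs.length - 1)).map (fun k : Nat => (k : Int)) := by
    rcases Nat.eq_zero_or_pos cs.length with h0 | hpos
    · rw [PySem.List.len_eq, h0]
      decide
    · rw [PySem.List.len_eq]
      have : (cs.length : Int) - 1 = ((cs.length - 1 : Nat) : Int) := by omega
      rw [this, PySem.List.pyRange_zero_natCast]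
  rw [hrange, List.filter_map, List.filter_map]
  rw [scan_top u ['G', 'T'] (by decide) (by decide), scan_top u ['A', 'G'] (by decide) (by decide)]
  rw [hul]
  have hbr : ∀ (pat : List Char), pat.length = 2 → ∀ k ∈ List.range (cs.length - 1),
      ((fun i => decide (PySem.Chars.upper
          (PySem.List.slice cs (some i) (some (i + 2))) = pat)) ∘ (fun k : Nat => (k : Int))) k
        = decide (pat <+: u.drop k) := by
    intro pat hlen k _
    simp only [Function.comp_apply, decide_eq_decide]
    exact pred_bridge cs pat hlen k
  congr 1
  · exact congrArg _ (List.filter_congr (hbr ['G', 'T'] (by decide)))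
  · exact congrArg _ (List.filter_congr (hbr ['A', 'G'] (by decide)))
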